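-- pv_equiv track=rewrite | github.com/d-henness/bioinfo_workflows | scripts_dir/split_up_vcf_by_line.py | find_next_split
-- ===== SOURCE A (Python) =====
-- def find_next_split(test_site, chro, all_sites):
--     low = 0
--     high = len(all_sites)
--     while(low <= high):
--         mid = int((low + high) / 2)
--         test_num = int(all_sites[mid])
--         if (mid == high):
--             break
--         if (test_num > test_site):
--             high = mid
--         elif (test_num <= test_site):
--             low = mid + 1
--     return mid, test_num
-- ===== SOURCE B (Python) =====
-- def find_next_split(test_site, chro, all_sites):
--     # Linear scan: the sites are sorted, so the split point is simply the
--     # first site strictly greater than test_site.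
--     for i, s in enumerate(all_sites):
--         v = int(s)
--         if v > test_site:
--             return i, v
--     raise ValueError("no site greater than test_site")
-- ===== Notes on version B (the rewrite author's own statement) =====
-- stated objective: simpler
-- what changed: replaces the binary-search loop by a single left-to-right scan that returns the first site strictly greater than test_site
-- outside the precondition, e.g. on find_next_split(2, '', ['1', '5', '0', '6']): A returns (3, 6), B returns (1, 5)
import Mathlib
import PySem

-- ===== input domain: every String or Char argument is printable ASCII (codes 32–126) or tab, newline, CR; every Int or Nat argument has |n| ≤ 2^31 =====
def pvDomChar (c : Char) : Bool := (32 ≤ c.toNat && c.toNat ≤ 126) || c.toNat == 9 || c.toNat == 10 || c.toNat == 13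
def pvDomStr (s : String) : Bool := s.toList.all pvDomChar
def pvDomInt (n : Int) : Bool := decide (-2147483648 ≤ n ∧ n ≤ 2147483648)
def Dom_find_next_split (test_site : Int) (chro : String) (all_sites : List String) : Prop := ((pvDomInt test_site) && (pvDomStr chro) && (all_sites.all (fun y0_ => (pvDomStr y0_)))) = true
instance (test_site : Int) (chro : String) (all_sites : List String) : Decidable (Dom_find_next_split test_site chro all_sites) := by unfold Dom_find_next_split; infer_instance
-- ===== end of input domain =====

-- B replaces A's binary search by a plain left-to-right scan for the first site > test_site
-- (simpler, not faster); equal to A on sorted int-string site lists containing such a site.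

-- ===== PORT A =====
-- midpoint bounds, needed by the port's termination proof (cited in decreasing_by)
theorem pvMidBounds (low high : Int) (h : low ≤ high) :
    low ≤ PySem.Int.truncdiv (low + high) 2 ∧ PySem.Int.truncdiv (low + high) 2 ≤ high := by
  have hs : (2 : Int).sign = 1 := rfl
  simp [PySem.Int.truncdiv, Int.tdiv_eq_ediv, hs]
  omega

-- the while-loop of A, state (low, high); Python's int((low+high)/2) is PySem.Int.truncdiv
def findNextSplitLoop (test_site : Int) (all_sites : List String) (low high : Int) : Int × Int :=
  if h : low ≤ high then
    let mid := PySem.Int.truncdiv (low + high) 2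
    match PySem.List.pyGet? all_sites mid with
    | none => (0, 0)            -- IndexError in Python: outside Pre_
    | some s =>
      match PySem.Int.ofStr? s with
      | none => (0, 0)          -- ValueError in Python: outside Pre_
      | some test_num =>
        if mid = high then (mid, test_num)
        else if test_num > test_site then
          findNextSplitLoop test_site all_sites low mid
        else
          findNextSplitLoop test_site all_sites (mid + 1) high
  else (0, 0)                   -- loop exit without a break: unreachable from the entry call
termination_by (high - low).toNat
decreasing_by
  · have hb := pvMidBounds low high h
    omega
  · have hb := pvMidBounds low high h
    omega

def find_next_split (test_site : Int) (chro : String) (all_sites : List String) : Int × Int :=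
  findNextSplitLoop test_site all_sites 0 (PySem.List.len all_sites)

-- ===== PORT B =====
-- B's for-loop over (i, s) in enumerate(all_sites)
def findNextScan (test_site : Int) (all_sites : List String) (i : Int) : Int × Int :=
  match all_sites with
  | [] => (0, 0)                -- Python B raises ValueError here: outside Pre_
  | s :: rest =>
    match PySem.Int.ofStr? s with
    | none => (0, 0)            -- ValueError in Python: outside Pre_
    | some v =>
      if v > test_site then (i, v)
      else findNextScan test_site rest (i + 1)

def find_next_split_alt (test_site : Int) (chro : String) (all_sites : List String) : Int × Int :=
  findNextScan test_site all_sites 0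

-- ===== PRECONDITION & SPEC =====
def pvSiteVals (all_sites : List String) : List Int :=
  all_sites.map (fun s => (PySem.Int.ofStr? s).getD 0)

-- Pre_ restricts to the function's intended domain ("sorted sites"): nonempty, int-parsable,
-- nondecreasing site lists with a site beyond test_site. Outside it A raises (IndexError on
-- empty input or when every site ≤ test_site, ValueError on non-integer strings) or, on
-- unsorted lists, A returns whatever value the accidental binary-search path lands on.
def Pre_find_next_split (test_site : Int) (chro : String) (all_sites : List String) : Prop :=
  all_sites ≠ [] ∧ (∀ s ∈ all_sites, (PySem.Int.ofStr? s).isSome = true) ∧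
  (pvSiteVals all_sites).Pairwise (· ≤ ·) ∧ test_site < (pvSiteVals all_sites).getLastD 0
instance (test_site : Int) (chro : String) (all_sites : List String) : Decidable (Pre_find_next_split test_site chro all_sites) := by unfold Pre_find_next_split; infer_instance

def pvWitness_find_next_split : Int × String × List String := (0, "", ["1", "3"])

def Spec_find_next_split (test_site : Int) (chro : String) (all_sites : List String) (out : Int × Int) : Prop := out = find_next_split_alt test_site chro all_sites
instance (test_site : Int) (chro : String) (all_sites : List String) (out : Int × Int) : Decidable (Spec_find_next_split test_site chro all_sites out) := by unfold Spec_find_next_split; infer_instance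

-- ===== CLAIM (what is proved, stated in full; the proofs are below) =====
def Claim_equal_find_next_split : Prop := ∀ (test_site : Int) (chro : String) (all_sites : List String), Dom_find_next_split test_site chro all_sites → Pre_find_next_split test_site chro all_sites → Spec_find_next_split test_site chro all_sites (find_next_split test_site chro all_sites)

-- ===== LEMMAS AND PROOFS =====
-- the midpoint can only equal high when the interval has shrunk to a point
theorem pvMidEqHigh (low high : Int) (h0 : 0 ≤ low) (h : low ≤ high)
    (he : PySem.Int.truncdiv (low + high) 2 = high) : low = high := by
  have hs : (2 : Int).sign = 1 := rfl
  simp [PySem.Int.truncdiv, Int.tdiv_eq_ediv, hs] at he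
  omega

-- B's scan returns the first index (offset by i) whose value exceeds test_site
theorem pv_scan_eq (ts : Int) (sites : List String) (vals : List Int)
    (hv : vals = pvSiteVals sites)
    (hp : ∀ s ∈ sites, (PySem.Int.ofStr? s).isSome = true)
    (k : Nat) (hk : k < vals.length) (hgt : ts < vals[k])
    (hle : ∀ j (_ : j < vals.length), j < k → vals[j] ≤ ts) (i : Int) :
    findNextScan ts sites i = (i + (k : Int), vals[k]) := by
  induction sites generalizing vals k i with
  | nil => subst hv; simp [pvSiteVals] at hk
  | cons s rest ih =>
    obtain ⟨v, hvs⟩ := Option.isSome_iff_exists.mp (hp s (by simp))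
    have hvals : vals = v :: pvSiteVals rest := by
      simp [hv, pvSiteVals, hvs]
    subst hvals
    rw [findNextScan]
    simp only [hvs]
    by_cases hcmp : v > ts
    · have hk0 : k = 0 := by
        by_contra hne
        have := hle 0 (by simp) (by omega)
        simp at this; omega
      subst hk0
      rw [if_pos hcmp]; simp
    · have hk0 : k ≠ 0 := by
        intro h; subst h; simp at hgt; omega
      obtain ⟨k', rfl⟩ : ∃ k', k = k' + 1 := ⟨k - 1, by omega⟩
      rw [if_neg hcmp]
      rw [ih (pvSiteVals rest) rfl (fun s hs => hp s (by simp [hs])) k'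
        (by simpa using hk) (by simpa using hgt)
        (fun j hj hjk => by
          have := hle (j+1) (by simpa using hj) (by omega)
          simpa using this) (i + 1)]
      simp; ring

-- A's loop converges to the same first index, given a sorted value list
theorem pv_loop_eq (ts : Int) (sites : List String) (vals : List Int)
    (hv : vals = pvSiteVals sites)
    (hp : ∀ s ∈ sites, (PySem.Int.ofStr? s).isSome = true)
    (hsort : vals.Pairwise (· ≤ ·))
    (k : Nat) (hk : k < vals.length) (hgt : ts < vals[k])
    (hle : ∀ j (_ : j < vals.length), j < k → vals[j] ≤ ts) :
    ∀ (low high : Int), 0 ≤ low → low ≤ (k : Int) → (k : Int) ≤ high → high ≤ (vals.length : Int) →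
    findNextSplitLoop ts sites low high = ((k : Int), vals[k]) := by
  have hlen : vals.length = sites.length := by simp [hv, pvSiteVals]
  have hmono : ∀ (i j : Nat) (_ : i < vals.length) (_ : j < vals.length), i ≤ j → vals[i] ≤ vals[j] := by
    intro i j hi hj hij
    rcases Nat.lt_or_eq_of_le hij with h | h
    · exact List.pairwise_iff_getElem.mp hsort i j hi hj h
    · subst h; rfl
  have hval : ∀ (j : Nat) (hj : j < sites.length),
      PySem.Int.ofStr? sites[j] = some (vals[j]'(by omega)) := by
    intro j hj
    obtain ⟨v, hvs⟩ := Option.isSome_iff_exists.mp (hp sites[j] (List.getElem_mem hj))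
    rw [hvs]
    congr 1
    simp [hv, pvSiteVals, hvs]
  intro low high
  induction hm : (high - low).toNat using Nat.strong_induction_on generalizing low high with
  | _ m ih =>
  intro h0 hlk hkh hhn
  have hlh : low ≤ high := by omega
  have hb := pvMidBounds low high hlh
  rw [findNextSplitLoop]
  simp only [dif_pos hlh]
  generalize hmid : PySem.Int.truncdiv (low + high) 2 = mid at hb ⊢
  have hmidlt : mid < (sites.length : Int) := by
    by_cases he : mid = high
    · have := pvMidEqHigh low high h0 hlh (by rw [hmid]; exact he)
      omega
    · omega
  have h0m : 0 ≤ mid := by omega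
  have hmn : mid.toNat < sites.length := by omega
  simp only [PySem.List.pyGet?_eq_some_getElem sites h0m hmidlt, hval mid.toNat hmn]
  by_cases he : mid = high
  · have hleq := pvMidEqHigh low high h0 hlh (by rw [hmid]; exact he)
    have hkm : (k : Int) = mid := by omega
    rw [if_pos he]
    simp [← hkm]
  · rw [if_neg he]
    have hmh : mid < high := by omega
    by_cases hc : vals[mid.toNat]'(by omega) > ts
    · have hkm : k ≤ mid.toNat := by
        by_contra hlt
        have := hle mid.toNat (by omega) (by omega)
        omega
      rw [if_pos hc]
      exact ih (mid - low).toNat (by omega) low mid rfl h0 hlk (by omega) (by omega)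
    · rw [if_neg hc]
      have hkm : mid.toNat < k := by
        by_contra hge
        have := hmono k mid.toNat (by omega) (by omega) (by omega)
        omega
      exact ih (high - (mid + 1)).toNat (by omega) (mid + 1) high rfl (by omega) (by omega) hkh hhn

-- ===== VERDICT (by name: the statement is the Claim_ definition above) =====
theorem find_next_split_spec : Claim_equal_find_next_split := by
  intro test_site chro all_sites _hdom hpre
  obtain ⟨hne, hp, hsort, hlast⟩ := hpre
  unfold Spec_find_next_split
  have hvne : pvSiteVals all_sites ≠ [] := by simpa [pvSiteVals] using hne
  have hlen0 : 0 < (pvSiteVals all_sites).length := List.length_pos_iff.mpr hvne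
  have hlastE : (pvSiteVals all_sites).getLastD 0 =
      (pvSiteVals all_sites)[(pvSiteVals all_sites).length - 1] := by
    rw [List.getLastD_eq_getLast?, List.getLast?_eq_getElem?,
      List.getElem?_eq_getElem (by omega)]
    rfl
  have hexD : ∃ j, j < (pvSiteVals all_sites).length ∧
      test_site < (pvSiteVals all_sites).getD j 0 := by
    refine ⟨(pvSiteVals all_sites).length - 1, by omega, ?_⟩
    rw [List.getD_eq_getElem _ _ (by omega)]
    rw [← hlastE]; exact hlast
  set k := Nat.find hexD with hkdef
  obtain ⟨hklt, hkgt⟩ := Nat.find_spec hexD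
  have hkgt' : test_site < (pvSiteVals all_sites)[k] := by
    rwa [List.getD_eq_getElem _ _ hklt] at hkgt
  have hmin : ∀ j (_ : j < (pvSiteVals all_sites).length), j < k →
      (pvSiteVals all_sites)[j] ≤ test_site := by
    intro j hj hjk
    have h1 := Nat.find_min hexD hjk
    push_neg at h1
    have h2 := h1 hj
    rwa [List.getD_eq_getElem _ _ hj] at h2
  have hlen : (pvSiteVals all_sites).length = all_sites.length := by simp [pvSiteVals]
  have hA := pv_loop_eq test_site all_sites (pvSiteVals all_sites) rfl hp hsort k hklt hkgt' hmin
    0 (PySem.List.len all_sites) le_rfl (by exact_mod_cast Nat.zero_le k)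
    (by rw [PySem.List.len_eq]; omega)
    (by rw [PySem.List.len_eq]; omega)
  have hB := pv_scan_eq test_site all_sites (pvSiteVals all_sites) rfl hp k hklt hkgt' hmin 0
  rw [find_next_split, find_next_split_alt, hA, hB]
  simp
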